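-- pv_equiv track=rewrite | github.com/carmelolg/python-math-is-fun | easter-date.py | get_gregorian_map_value_by_year
-- ===== SOURCE A (Python) =====
-- def get_gregorian_map_value_by_year(_year: int):
--     min_year = 1583
--     max_year = 2499
--
--     # Gregorian map for years 1699 to 2499
--     _map = {
--         1699: {'M': 22, 'N': 2},
--         1799: {'M': 23, 'N': 3},
--         1899: {'M': 23, 'N': 4},
--         2099: {'M': 24, 'N': 5},
--         2199: {'M': 24, 'N': 6},
--         2299: {'M': 25, 'N': 0},
--         2399: {'M': 26, 'N': 1},
--         2499: {'M': 25, 'N': 1}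
--     }
--
--     if _year < min_year or _year > max_year:
--         raise ValueError(f"Year must be between {min_year} and {max_year}")
--
--     for key in _map.keys():
--         if _year <= key:
--             return _map[key]
--     return None
-- ===== SOURCE B (Python) =====
-- _CENTURY_TABLE = {
--     15: (22, 2), 16: (22, 2),
--     17: (23, 3),
--     18: (23, 4),
--     19: (24, 5), 20: (24, 5),
--     21: (24, 6),
--     22: (25, 0),
--     23: (26, 1),
--     24: (25, 1),
-- }
--
-- def get_gregorian_map_value_by_year(_year: int):
--     min_year = 1583
--     max_year = 2499
--     if _year < min_year or _year > max_year:
--         raise ValueError(f"Year must be between {min_year} and {max_year}")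
--     # Index directly by the century (_year // 100): no scan over thresholds at all.
--     m, n = _CENTURY_TABLE[_year // 100]
--     return {'M': m, 'N': n}
-- ===== Notes on version B (the rewrite author's own statement) =====
-- stated objective: alternative
-- what changed: Replaces the sequential scan over the dict's threshold keys with direct O(1) arithmetic indexing: _year // 100 selects the century, which keys a precomputed century-to-(M,N) table; the same range check raises the same ValueError.
import Mathlib
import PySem

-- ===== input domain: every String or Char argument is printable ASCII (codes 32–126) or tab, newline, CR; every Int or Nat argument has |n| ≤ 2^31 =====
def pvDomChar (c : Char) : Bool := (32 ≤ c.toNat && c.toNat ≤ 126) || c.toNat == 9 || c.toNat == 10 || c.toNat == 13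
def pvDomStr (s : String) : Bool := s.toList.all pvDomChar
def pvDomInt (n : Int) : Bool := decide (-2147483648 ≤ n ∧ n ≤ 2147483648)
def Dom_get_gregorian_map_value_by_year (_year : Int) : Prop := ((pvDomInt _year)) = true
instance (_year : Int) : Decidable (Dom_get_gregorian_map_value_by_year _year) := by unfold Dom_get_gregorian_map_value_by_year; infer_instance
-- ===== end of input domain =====

-- ===== PORT A =====
-- One honest line: B replaces A's linear scan over the dict's threshold keys by
-- direct arithmetic indexing (_year // 100 into a century table) — alternative, not timed faster.

-- A's dict of thresholds, in insertion order, as a PySem.Dict.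
def pvMapA : PySem.Dict Int (List (String × Int)) :=
  PySem.Dict.ofList
  [(1699, [("M", 22), ("N", 2)]),
   (1799, [("M", 23), ("N", 3)]),
   (1899, [("M", 23), ("N", 4)]),
   (2099, [("M", 24), ("N", 5)]),
   (2199, [("M", 24), ("N", 6)]),
   (2299, [("M", 25), ("N", 0)]),
   (2399, [("M", 26), ("N", 1)]),
   (2499, [("M", 25), ("N", 1)])]

-- the loop 'for key in _map.keys(): if _year <= key: return _map[key]'
def pvScanA (_year : Int) : List Int → Option (List (String × Int))
  | [] => none
  | k :: ks => if _year ≤ k then PySem.Dict.get? pvMapA k else pvScanA _year ks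

def get_gregorian_map_value_by_year (_year : Int) : Option (List (String × Int)) :=
  if _year < 1583 ∨ _year > 2499 then none  -- Python raises ValueError here (excluded by Pre_)
  else pvScanA _year (PySem.Dict.keys pvMapA)

-- ===== PORT B =====
-- Source B's _CENTURY_TABLE, a dict keyed by the century.
def pvCenturyTable : PySem.Dict Int (Int × Int) :=
  PySem.Dict.ofList
  [(15, (22, 2)), (16, (22, 2)),
   (17, (23, 3)),
   (18, (23, 4)),
   (19, (24, 5)), (20, (24, 5)),
   (21, (24, 6)),
   (22, (25, 0)),
   (23, (26, 1)),
   (24, (25, 1))]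

def get_gregorian_map_value_by_year_alt (_year : Int) : Option (List (String × Int)) :=
  if _year < 1583 ∨ _year > 2499 then none  -- same ValueError (excluded by Pre_)
  else
    match PySem.Dict.get? pvCenturyTable (PySem.Int.floordiv _year 100) with
    | some (m, n) => some [("M", m), ("N", n)]
    | none => none  -- KeyError: unreachable inside the range check

-- ===== PRECONDITION & SPEC =====
-- Pre_ excludes exactly the years on which A raises ValueError.
def Pre_get_gregorian_map_value_by_year (_year : Int) : Prop := 1583 ≤ _year ∧ _year ≤ 2499
instance (_year : Int) : Decidable (Pre_get_gregorian_map_value_by_year _year) := by unfold Pre_get_gregorian_map_value_by_year; infer_instance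
def pvWitness_get_gregorian_map_value_by_year : Int := 2024

def Spec_get_gregorian_map_value_by_year (_year : Int) (out : Option (List (String × Int))) : Prop := out = get_gregorian_map_value_by_year_alt _year
instance (_year : Int) (out : Option (List (String × Int))) : Decidable (Spec_get_gregorian_map_value_by_year _year out) := by unfold Spec_get_gregorian_map_value_by_year; infer_instance

-- ===== CLAIM (what is proved, stated in full; the proofs are below) =====
def Claim_equal_get_gregorian_map_value_by_year : Prop := ∀ (_year : Int), Dom_get_gregorian_map_value_by_year _year → Pre_get_gregorian_map_value_by_year _year → Spec_get_gregorian_map_value_by_year _year (get_gregorian_map_value_by_year _year)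

-- ===== LEMMAS AND PROOFS =====

-- ===== VERDICT (by name: the statement is the Claim_ definition above) =====
theorem get_gregorian_map_value_by_year_spec : Claim_equal_get_gregorian_map_value_by_year := by
  intro y _ hpre
  unfold Spec_get_gregorian_map_value_by_year
  obtain ⟨h1, h2⟩ := hpre
  interval_cases y <;> decide
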